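-- pv_equiv track=rewrite | github.com/Robbbo-T/Q-AVIONGEN | deployment/qaviogen_api/app/utils.py | parse_time_duration
-- ===== SOURCE A (Python) =====
-- def parse_time_duration(duration_str: str) -> int:
--     """Parse time duration string to seconds
--
--     Args:
--         duration_str: Duration string (e.g., "1h30m", "45m", "120s")
--
--     Returns:
--         Duration in seconds
--     """
--     duration_str = duration_str.lower().strip()
--
--     if not duration_str:
--         return 0
--
--     total_seconds = 0
--     current_number = ""
--
--     for char in duration_str:
--         if char.isdigit():
--             current_number += char
--         elif char in ['h', 'm', 's']:
--             if current_number: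
--                 value = int(current_number)
--                 if char == 'h':
--                     total_seconds += value * 3600
--                 elif char == 'm':
--                     total_seconds += value * 60
--                 elif char == 's':
--                     total_seconds += value
--                 current_number = ""
--
--     # If there's a remaining number without unit, assume seconds
--     if current_number:
--         total_seconds += int(current_number)
--
--     return total_seconds
-- ===== SOURCE B (Python) =====
-- def parse_time_duration(duration_str: str) -> int:
--     """Parse time duration string to seconds (tokenize-and-reduce re-implementation)."""
--     mult = {'h': 3600, 'm': 60, 's': 1}
--     cleaned = [c for c in duration_str.lower() if c in '0123456789hms']
--     total = 0
--     i = 0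
--     n = len(cleaned)
--     while i < n:
--         if cleaned[i] in mult:
--             i += 1
--             continue
--         j = i
--         while j < n and cleaned[j].isdigit():
--             j += 1
--         value = int(''.join(cleaned[i:j]))
--         if j < n:
--             total += value * mult[cleaned[j]]
--             j += 1
--         else:
--             total += value
--         i = j
--     return total
-- ===== Notes on version B (the rewrite author's own statement) =====
-- stated objective: alternative
-- what changed: Replaced A's per-character state machine (running digit-string accumulator flushed on each unit letter, with per-char string concatenation) by a filter-then-tokenize pass: keep only [0-9hms] characters, then consume number-run + optional-unit tokens and sum value*multiplier; measured faster by a constant factor since digit runs are converted in one int() call instead of growing a string char by char.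
import Mathlib
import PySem

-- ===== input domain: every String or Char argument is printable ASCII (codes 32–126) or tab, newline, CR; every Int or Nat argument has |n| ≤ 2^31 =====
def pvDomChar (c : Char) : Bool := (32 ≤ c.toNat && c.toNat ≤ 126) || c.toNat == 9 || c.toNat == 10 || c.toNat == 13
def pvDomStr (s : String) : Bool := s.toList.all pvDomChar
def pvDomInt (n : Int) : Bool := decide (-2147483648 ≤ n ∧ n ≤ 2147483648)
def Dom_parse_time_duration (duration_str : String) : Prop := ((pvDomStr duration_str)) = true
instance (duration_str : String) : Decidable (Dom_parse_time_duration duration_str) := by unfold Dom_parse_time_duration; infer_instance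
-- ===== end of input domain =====

-- B replaces A's per-character accumulator state machine by filter-then-tokenize over number runs
-- (objective: alternative decomposition, same cost); return values only, no side effects involved.

-- shared thin wrapper for Python's int(<nonempty digit string>) (both programs only call it there)
def pvIntOf (cs : List Char) : Int := (PySem.Int.ofChars? cs).getD 0

-- ===== PORT A =====
-- one step of A's for-loop: state = (total_seconds, current_number)
def pvAStep (st : Int × List Char) (c : Char) : Int × List Char :=
  if PySem.Chars.isdigit c then (st.1, st.2 ++ [c])
  else if c = 'h' ∨ c = 'm' ∨ c = 's' then
    if st.2 = [] then st
    else
      let v := pvIntOf st.2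
      (if c = 'h' then st.1 + v * 3600
       else if c = 'm' then st.1 + v * 60
       else if c = 's' then st.1 + v
       else st.1, [])
  else st

def parse_time_duration (duration_str : String) : Int :=
  let d := PySem.Chars.strip (PySem.Chars.lower duration_str.toList)
  if d = [] then 0
  else
    let st := d.foldl pvAStep (0, [])
    st.1 + (if st.2 = [] then 0 else pvIntOf st.2)

-- ===== PORT B =====
-- mult[c] for c in 'hms' ('' handled at the call sites, multiplier 1)
def pvMultOf (c : Char) : Int := if c = 'h' then 3600 else if c = 'm' then 60 else 1

-- c in '0123456789hms'
def pvKeep (c : Char) : Bool := "0123456789hms".toList.contains c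

-- the while-loop over the cleaned list: skip unit letters, else consume a digit run + optional unit
def pvBGo : List Char → Int
  | [] => 0
  | c :: rest =>
    if c = 'h' ∨ c = 'm' ∨ c = 's' then pvBGo rest
    else if PySem.Chars.isdigit c then
      let v := pvIntOf (List.takeWhile PySem.Chars.isdigit (c :: rest))
      match h : List.dropWhile PySem.Chars.isdigit (c :: rest) with
      | u :: rest' => v * pvMultOf u + pvBGo rest'
      | [] => v
    else pvBGo rest   -- unreachable on a pvKeep-filtered list (totality guard)
  termination_by l => l.length
  decreasing_by
  · simp
  · have hlen : (u :: rest').length ≤ rest.length := by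
      have : List.dropWhile PySem.Chars.isdigit (c :: rest)
           = List.dropWhile PySem.Chars.isdigit rest := by
        simp [List.dropWhile, *]
      rw [this] at h
      rw [← h]
      exact List.length_dropWhile_le _ _
    simp at hlen ⊢
    omega
  · simp

def parse_time_duration_alt (duration_str : String) : Int :=
  pvBGo ((PySem.Chars.lower duration_str.toList).filter pvKeep)

-- ===== PRECONDITION & SPEC =====
def Spec_parse_time_duration (duration_str : String) (out : Int) : Prop := out = parse_time_duration_alt duration_str
instance (duration_str : String) (out : Int) : Decidable (Spec_parse_time_duration duration_str out) := by unfold Spec_parse_time_duration; infer_instance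

-- ===== CLAIM (what is proved, stated in full; the proofs are below) =====
def Claim_equal_parse_time_duration : Prop := ∀ (duration_str : String), Dom_parse_time_duration duration_str → Spec_parse_time_duration duration_str (parse_time_duration duration_str)

-- ===== LEMMAS AND PROOFS =====

-- a digit is not a unit letter
lemma pv_digit_not_unit {c : Char} (h : PySem.Chars.isdigit c = true) :
    ¬ (c = 'h' ∨ c = 'm' ∨ c = 's') := by
  rintro (rfl | rfl | rfl) <;> simp [PySem.Chars.isdigit] at h

-- an ASCII digit is one of the ten digit characters
lemma pv_digit_cases {c : Char} (h : PySem.Chars.isdigit c = true) :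
    c = '0' ∨ c = '1' ∨ c = '2' ∨ c = '3' ∨ c = '4' ∨ c = '5' ∨ c = '6' ∨ c = '7' ∨ c = '8' ∨ c = '9' := by
  simp [PySem.Chars.isdigit] at h
  obtain ⟨h1, h2⟩ := h
  have n1 : 48 ≤ c.toNat := by exact_mod_cast Char.le_def.mp h1
  have n2 : c.toNat ≤ 57 := by exact_mod_cast Char.le_def.mp h2
  have hc := Char.ofNat_toNat c
  interval_cases h : c.toNat <;> rw [← hc] <;> decide

lemma pv_digit_keep {c : Char} (h : PySem.Chars.isdigit c = true) : pvKeep c = true := by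
  rcases pv_digit_cases h with rfl|rfl|rfl|rfl|rfl|rfl|rfl|rfl|rfl|rfl <;> decide

lemma pv_unit_keep {c : Char} (h : c = 'h' ∨ c = 'm' ∨ c = 's') : pvKeep c = true := by
  rcases h with rfl|rfl|rfl <;> decide

-- a kept character is a digit or a unit letter
lemma pv_keep_elim {c : Char} (h : pvKeep c = true) :
    PySem.Chars.isdigit c = true ∨ (c = 'h' ∨ c = 'm' ∨ c = 's') := by
  simp [pvKeep] at h
  rcases h with rfl|rfl|rfl|rfl|rfl|rfl|rfl|rfl|rfl|rfl|rfl|rfl|rfl <;> simp [PySem.Chars.isdigit]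

-- whitespace is never kept
lemma pv_space_not_keep {c : Char} (h : PySem.Chars.isspace c = true) : pvKeep c = false := by
  by_contra hk
  simp only [Bool.not_eq_false] at hk
  rcases pv_keep_elim hk with hd | hu
  · rcases pv_digit_cases hd with rfl|rfl|rfl|rfl|rfl|rfl|rfl|rfl|rfl|rfl <;> simp [PySem.Chars.isspace] at h
  · rcases hu with rfl|rfl|rfl <;> simp [PySem.Chars.isspace] at h

-- takeWhile / dropWhile across an all-digit prefix
lemma pv_dropWhile_digits {ds : List Char} (hds : ∀ c ∈ ds, PySem.Chars.isdigit c = true) (l : List Char) :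
    List.dropWhile PySem.Chars.isdigit (ds ++ l) = List.dropWhile PySem.Chars.isdigit l := by
  simp [List.dropWhile_append, List.dropWhile_eq_nil_iff.mpr hds]

lemma pv_takeWhile_digits {ds : List Char} (hds : ∀ c ∈ ds, PySem.Chars.isdigit c = true) (l : List Char) :
    List.takeWhile PySem.Chars.isdigit (ds ++ l) = ds ++ List.takeWhile PySem.Chars.isdigit l := by
  simp [List.takeWhile_append, List.takeWhile_eq_self_iff.mpr hds]

-- pvBGo skips a leading unit letter
lemma pvBGo_unit_cons {u : Char} (hu : u = 'h' ∨ u = 'm' ∨ u = 's') (xs : List Char) :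
    pvBGo (u :: xs) = pvBGo xs := by
  rw [pvBGo]
  simp [hu]

-- pvBGo on a pure nonempty digit run
lemma pvBGo_digits {ds : List Char} (hne : ds ≠ [])
    (hds : ∀ c ∈ ds, PySem.Chars.isdigit c = true) :
    pvBGo ds = pvIntOf ds := by
  obtain ⟨d, ds', rfl⟩ := List.exists_cons_of_ne_nil hne
  have hd : PySem.Chars.isdigit d = true := hds d (by simp)
  have htake : List.takeWhile PySem.Chars.isdigit (d :: ds') = d :: ds' :=
    List.takeWhile_eq_self_iff.mpr hds
  have hdrop : List.dropWhile PySem.Chars.isdigit (d :: ds') = [] :=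
    List.dropWhile_eq_nil_iff.mpr hds
  rw [pvBGo]
  simp only [pv_digit_not_unit hd, hd, htake, if_true, ite_false]
  split
  · next u rest' h => rw [hdrop] at h; cases h
  · rfl

-- pvBGo on a digit run followed by a unit letter
lemma pvBGo_run {ds : List Char} (hne : ds ≠ [])
    (hds : ∀ c ∈ ds, PySem.Chars.isdigit c = true)
    {u : Char} (hu : u = 'h' ∨ u = 'm' ∨ u = 's') (xs : List Char) :
    pvBGo (ds ++ u :: xs) = pvIntOf ds * pvMultOf u + pvBGo xs := by
  obtain ⟨d, ds', rfl⟩ := List.exists_cons_of_ne_nil hne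
  have hd : PySem.Chars.isdigit d = true := hds d (by simp)
  have hu' : PySem.Chars.isdigit u = false := by
    rcases hu with rfl|rfl|rfl <;> decide
  have htake : List.takeWhile PySem.Chars.isdigit ((d :: ds') ++ u :: xs) = d :: ds' := by
    rw [pv_takeWhile_digits hds]
    simp [List.takeWhile, hu']
  have hdrop : List.dropWhile PySem.Chars.isdigit ((d :: ds') ++ u :: xs) = u :: xs := by
    rw [pv_dropWhile_digits hds]
    simp [List.dropWhile, hu']
  rw [show (d :: ds') ++ u :: xs = d :: (ds' ++ u :: xs) by simp, pvBGo]
  simp only [show d :: (ds' ++ u :: xs) = (d :: ds') ++ u :: xs by simp, htake]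
  simp only [pv_digit_not_unit hd, hd, if_neg, not_false_iff, ite_true]
  split
  · next u1 rest' h =>
      rw [show d :: (ds' ++ u :: xs) = (d :: ds') ++ u :: xs from rfl, hdrop] at h
      injection h with h1 h2
      subst h1; subst h2; rfl
  · next h =>
      rw [show d :: (ds' ++ u :: xs) = (d :: ds') ++ u :: xs from rfl, hdrop] at h
      cases h

-- the main loop invariant: A's fold from state (t, cur) = t + B's tokenizer on cur ++ filtered rest
lemma pv_main (l : List Char) (t : Int) (cur : List Char)
    (hcur : ∀ c ∈ cur, PySem.Chars.isdigit c = true) :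
    (l.foldl pvAStep (t, cur)).1
      + (if (l.foldl pvAStep (t, cur)).2 = [] then 0 else pvIntOf (l.foldl pvAStep (t, cur)).2)
    = t + pvBGo (cur ++ l.filter pvKeep) := by
  induction l generalizing t cur with
  | nil =>
    simp only [List.foldl_nil, List.filter_nil, List.append_nil]
    by_cases h : cur = []
    · subst h; simp [pvBGo]
    · rw [if_neg h, pvBGo_digits h hcur]
  | cons c l ih =>
    simp only [List.foldl_cons, List.filter_cons]
    by_cases hdig : PySem.Chars.isdigit c = true
    · rw [pv_digit_keep hdig]
      simp only [pvAStep, hdig, if_true]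
      rw [ih t (cur ++ [c]) (by intro x hx; rcases List.mem_append.mp hx with h | h
                                · exact hcur x h
                                · simp at h; subst h; exact hdig)]
      simp
    · by_cases hu : c = 'h' ∨ c = 'm' ∨ c = 's'
      · rw [pv_unit_keep hu]
        simp only [pvAStep, hdig, Bool.false_eq_true, if_false, hu, if_true]
        by_cases hc : cur = []
        · rw [if_pos hc, ih t cur hcur, hc]
          simp only [List.nil_append]
          rw [pvBGo_unit_cons hu]
        · rw [if_neg hc]
          rw [ih _ [] (by intro x hx; cases hx)]
          simp only [List.nil_append]
          rw [pvBGo_run hc hcur hu]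
          rcases hu with rfl|rfl|rfl <;> simp [pvMultOf] <;> ring
      · have hk : pvKeep c = false := by
          by_contra hkk
          simp only [Bool.not_eq_false] at hkk
          rcases pv_keep_elim hkk with h | h
          · exact hdig h
          · exact hu h
        rw [hk]
        simp only [pvAStep, hdig, Bool.false_eq_true, if_false, hu]
        exact ih t cur hcur

-- filter pvKeep ignores a dropped whitespace prefix
lemma pv_filter_dropWhile (x : List Char) :
    (x.dropWhile PySem.Chars.isspace).filter pvKeep = x.filter pvKeep := by
  induction x with
  | nil => rfl
  | cons c cs ih =>
    by_cases h : PySem.Chars.isspace c = true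
    · rw [List.dropWhile_cons_of_pos h, ih, List.filter_cons, pv_space_not_keep h]
      simp
    · rw [List.dropWhile_cons_of_neg (by simp [h])]

-- filtering commutes with strip: stripped chars are whitespace, never kept
lemma pv_filter_strip (l : List Char) :
    (PySem.Chars.strip l).filter pvKeep = l.filter pvKeep := by
  unfold PySem.Chars.strip PySem.Chars.rstrip PySem.Chars.lstrip
  rw [List.filter_reverse, pv_filter_dropWhile, List.filter_reverse, List.reverse_reverse,
      pv_filter_dropWhile]

-- ===== VERDICT (by name: the statement is the Claim_ definition above) =====
theorem parse_time_duration_spec : Claim_equal_parse_time_duration := by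
  intro s _
  unfold Spec_parse_time_duration parse_time_duration parse_time_duration_alt
  set L := PySem.Chars.lower s.toList with hL
  by_cases hd : PySem.Chars.strip L = []
  · rw [if_pos hd, ← pv_filter_strip L, hd]
    simp [pvBGo]
  · rw [if_neg hd]
    have := pv_main (PySem.Chars.strip L) 0 [] (by intro c hc; cases hc)
    simp only [List.nil_append] at this
    rw [this, pv_filter_strip L, zero_add]
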